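-- pv_equiv track=rewrite | github.com/DandingN/SAPPO | test_plot.py | get_path_from_actions
-- ===== SOURCE A (Python) =====
-- def get_path_from_actions(actions, start=(0, 0), size=10):
--     """
--     从给定的动作序列生成路径坐标。
--
--     :param actions: 动作序列，列表形式，每个元素为 0~3 的整数
--     :param start: 初始坐标，默认为 (0, 0)
--     :param size: 网格大小（size × size 的方格），默认为 5
--     :return: 路径坐标列表，例如 [(0,0), (0,1), ...]
--     """
--     x, y = start
--     path = [[x, y]]
--
--     for action in actions:
--         if action == 0:  # Up
--             x = max(0, x - 1)
--         elif action == 1:  # Down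
--             x = min(size - 1, x + 1)
--         elif action == 2:  # Left
--             y = max(0, y - 1)
--         elif action == 3:  # Right
--             y = min(size - 1, y + 1)
--         else:
--             raise ValueError(f"Invalid action: {action}. Must be 0~3.")
--
--         path.append([x, y])
--
--     return path
-- ===== SOURCE B (Python) =====
-- def get_path_from_actions(actions, start=(0, 0), size=10):
--     # Validate all actions up front.
--     for a in actions:
--         if a not in (0, 1, 2, 3):
--             raise ValueError(f"Invalid action: {a}. Must be 0~3.")
--     # The two coordinates evolve independently: x reacts only to actions 0/1,
--     # y only to 2/3.  Compute each coordinate's trajectory separately, then zip.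
--     xs = [start[0]]
--     for a in actions:
--         x = xs[-1]
--         if a == 0:
--             x = max(0, x - 1)
--         elif a == 1:
--             x = min(size - 1, x + 1)
--         xs.append(x)
--     ys = [start[1]]
--     for a in actions:
--         y = ys[-1]
--         if a == 2:
--             y = max(0, y - 1)
--         elif a == 3:
--             y = min(size - 1, y + 1)
--         ys.append(y)
--     return [[x, y] for x, y in zip(xs, ys)]
-- ===== Notes on version B (the rewrite author's own statement) =====
-- stated objective: alternative
-- what changed: Instead of one pass updating joint (x,y) state and appending, B validates the actions first, then computes the x-trajectory and y-trajectory in two independent per-coordinate passes (x reacts only to actions 0/1, y only to 2/3) and zips them into the path.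
import Mathlib
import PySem

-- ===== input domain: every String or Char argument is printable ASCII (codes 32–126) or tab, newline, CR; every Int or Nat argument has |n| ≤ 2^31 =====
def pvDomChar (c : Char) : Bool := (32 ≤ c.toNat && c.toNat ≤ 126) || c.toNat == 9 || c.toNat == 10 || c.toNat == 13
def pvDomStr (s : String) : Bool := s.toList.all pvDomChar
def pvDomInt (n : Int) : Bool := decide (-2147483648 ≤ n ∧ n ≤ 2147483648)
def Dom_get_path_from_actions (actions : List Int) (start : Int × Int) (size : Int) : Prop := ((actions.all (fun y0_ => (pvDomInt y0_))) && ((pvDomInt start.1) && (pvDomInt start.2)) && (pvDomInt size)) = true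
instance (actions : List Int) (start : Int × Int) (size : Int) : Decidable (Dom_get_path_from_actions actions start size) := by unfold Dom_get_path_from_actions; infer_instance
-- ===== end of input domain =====

-- B replaces A's single pass over joint (x,y) state by an up-front validation pass plus two
-- independent per-coordinate scans (x reacts only to actions 0/1, y only to 2/3) zipped together.

-- ===== PORT A =====
-- Literal port of A's loop: state (x, y, path), path appended each step.
-- On an invalid action A raises ValueError; such inputs are excluded by Pre_,
-- and the port returns the path accumulated so far there.
def pvLoopA (size : Int) : List Int → Int → Int → List (List Int) → List (List Int)
  | [], _, _, path => path
  | a :: rest, x, y, path =>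
    if a = 0 then
      pvLoopA size rest (max 0 (x - 1)) y (path ++ [[max 0 (x - 1), y]])
    else if a = 1 then
      pvLoopA size rest (min (size - 1) (x + 1)) y (path ++ [[min (size - 1) (x + 1), y]])
    else if a = 2 then
      pvLoopA size rest x (max 0 (y - 1)) (path ++ [[x, max 0 (y - 1)]])
    else if a = 3 then
      pvLoopA size rest x (min (size - 1) (y + 1)) (path ++ [[x, min (size - 1) (y + 1)]])
    else path  -- raise ValueError (outside Pre_)

def get_path_from_actions (actions : List Int) (start : Int × Int) (size : Int) : List (List Int) :=
  pvLoopA size actions start.1 start.2 [[start.1, start.2]]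

-- ===== PORT B =====
-- B's x-trajectory loop: emits the current x, then continues with the updated x.
def pvScanX (size : Int) : Int → List Int → List Int
  | x, [] => [x]
  | x, a :: rest =>
    x :: pvScanX size (if a = 0 then max 0 (x - 1) else if a = 1 then min (size - 1) (x + 1) else x) rest

-- B's y-trajectory loop.
def pvScanY (size : Int) : Int → List Int → List Int
  | y, [] => [y]
  | y, a :: rest =>
    y :: pvScanY size (if a = 2 then max 0 (y - 1) else if a = 3 then min (size - 1) (y + 1) else y) rest

-- B: validation pass (raise on invalid action → outside Pre_), then zip the two trajectories.
def get_path_from_actions_alt (actions : List Int) (start : Int × Int) (size : Int) : List (List Int) :=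
  if actions.all (fun a => a == 0 || a == 1 || a == 2 || a == 3) then
    List.zipWith (fun x y => [x, y]) (pvScanX size start.1 actions) (pvScanY size start.2 actions)
  else []  -- raise ValueError (outside Pre_)

-- ===== PRECONDITION & SPEC =====
-- A raises ValueError on any action outside 0..3; Pre_ excludes exactly those inputs.
def Pre_get_path_from_actions (actions : List Int) (start : Int × Int) (size : Int) : Prop :=
  ∀ a ∈ actions, a = 0 ∨ a = 1 ∨ a = 2 ∨ a = 3
instance (actions : List Int) (start : Int × Int) (size : Int) : Decidable (Pre_get_path_from_actions actions start size) := by unfold Pre_get_path_from_actions; infer_instance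
def pvWitness_get_path_from_actions : List Int × (Int × Int) × Int := ([1, 3, 0, 2, 1], (0, 0), 5)

def Spec_get_path_from_actions (actions : List Int) (start : Int × Int) (size : Int) (out : List (List Int)) : Prop := out = get_path_from_actions_alt actions start size
instance (actions : List Int) (start : Int × Int) (size : Int) (out : List (List Int)) : Decidable (Spec_get_path_from_actions actions start size out) := by unfold Spec_get_path_from_actions; infer_instance

-- ===== CLAIM (what is proved, stated in full; the proofs are below) =====
def Claim_equal_get_path_from_actions : Prop := ∀ (actions : List Int) (start : Int × Int) (size : Int), Dom_get_path_from_actions actions start size → Pre_get_path_from_actions actions start size → Spec_get_path_from_actions actions start size (get_path_from_actions actions start size)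

-- ===== LEMMAS AND PROOFS =====
-- The zipped trajectories, as one list.
def pvZip (size x y : Int) (actions : List Int) : List (List Int) :=
  List.zipWith (fun x y => [x, y]) (pvScanX size x actions) (pvScanY size y actions)

lemma pvZip_head (size x y : Int) (actions : List Int) :
    pvZip size x y actions = [x, y] :: (pvZip size x y actions).tail := by
  cases actions <;> simp [pvZip, pvScanX, pvScanY]

lemma pvLoopA_zip (size : Int) (actions : List Int) :
    ∀ (x y : Int) (path : List (List Int)),
      (∀ a ∈ actions, a = 0 ∨ a = 1 ∨ a = 2 ∨ a = 3) →
      pvLoopA size actions x y path = path ++ (pvZip size x y actions).tail := by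
  induction actions with
  | nil => intro x y path _; simp [pvLoopA, pvZip, pvScanX, pvScanY]
  | cons a rest ih =>
    intro x y path h
    have ha := h a (List.mem_cons_self ..)
    have hrest : ∀ b ∈ rest, b = 0 ∨ b = 1 ∨ b = 2 ∨ b = 3 :=
      fun b hb => h b (List.mem_cons_of_mem _ hb)
    rcases ha with h0 | h1 | h2 | h3 <;> subst_vars
    · have hz : (pvZip size x y (0 :: rest)).tail = pvZip size (max 0 (x - 1)) y rest := by
        simp [pvZip, pvScanX, pvScanY]
      simp only [pvLoopA]; norm_num
      rw [ih _ _ _ hrest, hz, pvZip_head size (max 0 (x - 1)) y rest]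
      simp
    · have hz : (pvZip size x y (1 :: rest)).tail = pvZip size (min (size - 1) (x + 1)) y rest := by
        simp [pvZip, pvScanX, pvScanY]
      simp only [pvLoopA]; norm_num
      rw [ih _ _ _ hrest, hz, pvZip_head size (min (size - 1) (x + 1)) y rest]
      simp
    · have hz : (pvZip size x y (2 :: rest)).tail = pvZip size x (max 0 (y - 1)) rest := by
        simp [pvZip, pvScanX, pvScanY]
      simp only [pvLoopA]; norm_num
      rw [ih _ _ _ hrest, hz, pvZip_head size x (max 0 (y - 1)) rest]
      simp
    · have hz : (pvZip size x y (3 :: rest)).tail = pvZip size x (min (size - 1) (y + 1)) rest := by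
        simp [pvZip, pvScanX, pvScanY]
      simp only [pvLoopA]; norm_num
      rw [ih _ _ _ hrest, hz, pvZip_head size x (min (size - 1) (y + 1)) rest]
      simp

-- ===== VERDICT (by name: the statement is the Claim_ definition above) =====
theorem get_path_from_actions_spec : Claim_equal_get_path_from_actions := by
  intro actions start size _ hpre
  unfold Spec_get_path_from_actions get_path_from_actions get_path_from_actions_alt
  have hall : actions.all (fun a => a == 0 || a == 1 || a == 2 || a == 3) = true := by
    simp only [List.all_eq_true]
    intro a hamem
    rcases hpre a hamem with h | h | h | h <;> simp [h]
  rw [if_pos hall, pvLoopA_zip size actions start.1 start.2 _ hpre]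
  show [[start.1, start.2]] ++ (pvZip size start.1 start.2 actions).tail
      = pvZip size start.1 start.2 actions
  rw [List.singleton_append]
  exact (pvZip_head size start.1 start.2 actions).symm
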